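-- pv_equiv track=rewrite | github.com/SirLJM/Sales-Data-Analysis | utils/hpgl_parser.py | parse_filename
-- ===== SOURCE A (Python) =====
-- def parse_filename(filename: str) -> dict[str, str]:
--     result: dict[str, str] = {}
--     name = filename.rsplit(".", 1)[0] if "." in filename else filename
--     parts = [p.strip() for p in name.split(" - ")]
--
--     if len(parts) >= 1:
--         result["model"] = parts[0]
--     if len(parts) >= 2:
--         result["product_type"] = parts[1]
--     if len(parts) >= 3:
--         result["size_run"] = parts[2]
--     if len(parts) >= 4:
--         result["material"] = parts[3]
--     if len(parts) >= 5:
--         result["marker_id"] = parts[4]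
--
--     return result
-- ===== SOURCE B (Python) =====
-- def parse_filename(filename: str) -> dict[str, str]:
--     # Recursive scanner: consume the name left to right with find/slicing and a
--     # shrinking key list; no parts list is ever materialized.
--     name = filename.rsplit(".", 1)[0] if "." in filename else filename
--
--     def go(s: str, keys: list[str]) -> dict[str, str]:
--         if not keys:
--             return {}
--         i = s.find(" - ")
--         if i == -1:
--             return {keys[0]: s.strip()}
--         return {keys[0]: s[:i].strip(), **go(s[i + 3:], keys[1:])}
--
--     return go(name, ["model", "product_type", "size_run", "material", "marker_id"])
-- ===== Notes on version B (the rewrite author's own statement) =====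
-- stated objective: alternative
-- what changed: Replaced A's split-into-a-parts-list plus five length-guarded dict assignments by a recursive left-to-right scanner that locates each separator with str.find, slices off one field at a time and consumes a shrinking key list, never materializing the parts list.
import Mathlib
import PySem

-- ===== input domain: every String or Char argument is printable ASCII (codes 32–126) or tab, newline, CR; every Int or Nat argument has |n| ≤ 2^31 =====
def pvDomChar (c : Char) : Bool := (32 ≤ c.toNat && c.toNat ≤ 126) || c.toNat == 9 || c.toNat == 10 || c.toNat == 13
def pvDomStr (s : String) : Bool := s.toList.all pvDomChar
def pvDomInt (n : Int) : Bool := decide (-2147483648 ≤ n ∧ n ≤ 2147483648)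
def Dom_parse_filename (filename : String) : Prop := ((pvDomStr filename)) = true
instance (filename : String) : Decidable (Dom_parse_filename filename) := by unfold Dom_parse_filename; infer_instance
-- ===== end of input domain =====

-- B replaces A's split-into-a-parts-list plus five guarded dict assignments by a recursive
-- find/slice scanner over a shrinking key list (objective: alternative); return values are
-- proved equal on all inputs.

-- Shared hand port of Python's `filename.rsplit(".", 1)[0] if "." in filename else filename`
-- (rsplit has no PySem primitive): when '.' occurs, the prefix before the LAST '.' is
-- obtained by reversing, dropping up to and including the first '.', and reversing back —
-- exact for every string.
def pvName (filename : String) : String :=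
  if PySem.Str.isIn "." filename then
    String.ofList (((filename.toList.reverse.dropWhile (fun c => c ≠ '.')).tail).reverse)
  else filename

-- ===== PORT A =====
def parse_filename (filename : String) : List (String × String) :=
  let name := pvName filename
  let parts := ((PySem.Str.split? name " - ").getD []).map PySem.Str.strip
  -- result: dict[str,str] as an insertion-ordered association list; the five keys are
  -- pairwise-distinct literals never yet present, so each `result[k] = v` appends — exact.
  let result : List (String × String) := []
  let result := if 1 ≤ parts.length then result ++ [("model", PySem.List.pyGetD parts 0 "")] else result
  let result := if 2 ≤ parts.length then result ++ [("product_type", PySem.List.pyGetD parts 1 "")] else result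
  let result := if 3 ≤ parts.length then result ++ [("size_run", PySem.List.pyGetD parts 2 "")] else result
  let result := if 4 ≤ parts.length then result ++ [("material", PySem.List.pyGetD parts 3 "")] else result
  let result := if 5 ≤ parts.length then result ++ [("marker_id", PySem.List.pyGetD parts 4 "")] else result
  result

-- ===== PORT B =====
def pvKeys : List String := ["model", "product_type", "size_run", "material", "marker_id"]

-- Source B's inner `go(s, keys)`: structural recursion on the key list; in the slicing branch
-- the found index i is ≥ 0, so Python's s[:i] / s[i+3:] are exactly take i.toNat /
-- drop (i.toNat + 3).
def pvGo (s : List Char) (keys : List String) : List (String × String) :=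
  match keys with
  | [] => []
  | k :: ks =>
    let i := PySem.Chars.find s [' ', '-', ' ']
    if i = -1 then [(k, PySem.Str.strip (String.ofList s))]
    else (k, PySem.Str.strip (String.ofList (s.take i.toNat))) ::
         pvGo (s.drop (i.toNat + 3)) ks

def parse_filename_alt (filename : String) : List (String × String) :=
  pvGo (pvName filename).toList pvKeys

-- ===== PRECONDITION & SPEC =====
def Spec_parse_filename (filename : String) (out : List (String × String)) : Prop := out = parse_filename_alt filename
instance (filename : String) (out : List (String × String)) : Decidable (Spec_parse_filename filename out) := by unfold Spec_parse_filename; infer_instance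

-- ===== CLAIM (what is proved, stated in full; the proofs are below) =====
def Claim_equal_parse_filename : Prop := ∀ (filename : String), Dom_parse_filename filename → Spec_parse_filename filename (parse_filename filename)

-- ===== LEMMAS AND PROOFS =====

def pvSep : List Char := [' ', '-', ' ']

-- find.go shifts its start index additively.
theorem pv_find_go_shift (sub l : List Char) (k : Nat) :
    PySem.Chars.find.go sub l k =
      if PySem.Chars.find.go sub l 0 = -1 then -1 else PySem.Chars.find.go sub l 0 + k := by
  induction l generalizing k with
  | nil =>
    simp [PySem.Chars.find.go]
    split <;> simp
  | cons c t ih =>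
    rw [PySem.Chars.find.go]
    conv_rhs => rw [PySem.Chars.find.go]
    by_cases hp : sub.isPrefixOf (c :: t)
    · simp [hp]
    · simp only [hp]
      rw [ih (k+1), ih 1]
      have hnn : -1 ≤ PySem.Chars.find.go sub t 0 := by
        have := PySem.Chars.neg_one_le_find t sub
        simpa [PySem.Chars.find] using this
      by_cases h0 : PySem.Chars.find.go sub t 0 = -1
      · simp [h0]
      · have : ¬ (PySem.Chars.find.go sub t 0 + 1 = -1) := by omega
        simp [h0, this]; omega

-- find on a cons, expressed through find on the tail.
theorem pv_find_cons (sub : List Char) (c : Char) (t : List Char) :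
    PySem.Chars.find (c :: t) sub =
      if sub.isPrefixOf (c :: t) then 0
      else if PySem.Chars.find t sub = -1 then -1 else PySem.Chars.find t sub + 1 := by
  rw [PySem.Chars.find, PySem.Chars.find.go]
  by_cases hp : sub.isPrefixOf (c :: t)
  · simp [hp]
  · simp only [hp]
    rw [pv_find_go_shift]
    rfl

-- Reference recursion: the find-based decomposition into separator-delimited pieces.
def pvPieces (t : List Char) : List (List Char) :=
  if PySem.Chars.find t pvSep = -1 then [t]
  else t.take (PySem.Chars.find t pvSep).toNat ::
       pvPieces (t.drop ((PySem.Chars.find t pvSep).toNat + 3))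
termination_by t.length
decreasing_by
  have ht : t ≠ [] := by rintro rfl; exact ‹¬ _› (by decide)
  have : 0 < t.length := List.length_pos_of_ne_nil ht
  simp only [List.length_drop]; omega

theorem pvPieces_ne_nil (t : List Char) : pvPieces t ≠ [] := by
  rw [pvPieces]; split <;> simp

def pvModHead (f : List Char → List Char) : List (List Char) → List (List Char)
  | [] => []
  | x :: xs => f x :: xs

-- splitOn.go with enough fuel computes the find-based pieces (accumulators made explicit).
theorem pv_splitOn_go_spec (fuel : Nat) (t cur : List Char) (acc : List (List Char))
    (h : t.length < fuel) :
    PySem.Chars.splitOn.go pvSep fuel t cur acc =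
      acc.reverse ++ pvModHead (fun x => cur.reverse ++ x) (pvPieces t) := by
  induction fuel generalizing t cur acc with
  | zero => omega
  | succ n ih =>
    match t with
    | [] =>
      rw [PySem.Chars.splitOn.go]
      rw [pvPieces]
      · simp [pvModHead, PySem.Chars.find, PySem.Chars.find.go, pvSep]
      · omega
    | c :: rest =>
      rw [PySem.Chars.splitOn.go]
      by_cases hp : pvSep.isPrefixOf (c :: rest)
      · simp only [hp, if_true]
        have hfind : PySem.Chars.find (c :: rest) pvSep = 0 := by
          rw [pv_find_cons]; simp [hp]
        rw [ih _ _ _ (by simp [pvSep] at h ⊢; omega)]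
        conv_rhs => rw [pvPieces]
        rw [hfind]
        rcases hpc : pvPieces ((c :: rest).drop ((0:Int).toNat + 3)) with _ | ⟨p, ps⟩
        · exact absurd hpc (pvPieces_ne_nil _)
        · simp at hpc
          simp [pvModHead, pvSep, hpc]
      · simp only [hp, Bool.false_eq_true, if_false]
        rw [ih _ _ _ (by simp at h ⊢; omega)]
        by_cases h0 : PySem.Chars.find rest pvSep = -1
        · conv_rhs => rw [pvPieces]
          rw [pvPieces]
          simp [pv_find_cons, hp, h0, pvModHead]
        · conv_rhs => rw [pvPieces]
          rw [pvPieces]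
          have hnn : 0 ≤ PySem.Chars.find rest pvSep := by
            have := PySem.Chars.neg_one_le_find rest pvSep; omega
          have hne : ¬ (PySem.Chars.find rest pvSep + 1 = -1) := by omega
          have h1 : (PySem.Chars.find rest pvSep + 1).toNat = (PySem.Chars.find rest pvSep).toNat + 1 := by omega
          have h2 : (PySem.Chars.find rest pvSep).toNat + 1 + 3 = ((PySem.Chars.find rest pvSep).toNat + 3) + 1 := by omega
          simp only [pv_find_cons, hp, Bool.false_eq_true, if_false, h0, hne, h1, h2,
            List.take_succ_cons, List.drop_succ_cons, pvModHead, List.reverse_cons]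
          simp

theorem pv_splitOn_eq_pieces (t : List Char) :
    PySem.Chars.splitOn t pvSep = pvPieces t := by
  rw [PySem.Chars.splitOn, pv_splitOn_go_spec (t.length + 1) t [] [] (by omega)]
  rcases h : pvPieces t with _ | ⟨p, ps⟩
  · exact absurd h (pvPieces_ne_nil _)
  · simp [pvModHead]

-- The if-ladder over `ps.map strip` builds exactly the key-table zip, for ANY parts list.
theorem pv_ladder_eq_zip (ps : List String) :
    (let parts := ps.map PySem.Str.strip
     let result : List (String × String) := []
     let result := if 1 ≤ parts.length then result ++ [("model", PySem.List.pyGetD parts 0 "")] else result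
     let result := if 2 ≤ parts.length then result ++ [("product_type", PySem.List.pyGetD parts 1 "")] else result
     let result := if 3 ≤ parts.length then result ++ [("size_run", PySem.List.pyGetD parts 2 "")] else result
     let result := if 4 ≤ parts.length then result ++ [("material", PySem.List.pyGetD parts 3 "")] else result
     let result := if 5 ≤ parts.length then result ++ [("marker_id", PySem.List.pyGetD parts 4 "")] else result
     result) =
    (pvKeys.zip ps).map (fun kp => (kp.1, PySem.Str.strip kp.2)) := by
  match ps with
  | [] => rfl
  | [a] => rfl
  | [a, b] => rfl
  | [a, b, c] => rfl
  | [a, b, c, d] => rfl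
  | a :: b :: c :: d :: e :: t =>
    simp [pvKeys, PySem.List.pyGetD, PySem.List.pyGet?, PySem.List.pyIdx?, List.zip]
    refine ⟨?_, ?_, ?_, ?_, ?_⟩ <;> rw [if_pos (by omega)] <;> rfl

-- The scanner equals the key-table zip over the find-based pieces.
theorem pv_go_eq_zip (ks : List String) (t : List Char) :
    pvGo t ks = (ks.zip (pvPieces t)).map (fun kp => (kp.1, PySem.Str.strip (String.ofList kp.2))) := by
  induction ks generalizing t with
  | nil => simp [pvGo]
  | cons k ks ih =>
    rw [pvGo, pvPieces]
    simp only [show ([' ', '-', ' '] : List Char) = pvSep from rfl]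
    by_cases h : PySem.Chars.find t pvSep = -1
    · simp [h]
    · simp only [h, if_false]
      rw [ih]
      simp

-- ===== VERDICT (by name: the statement is the Claim_ definition above) =====
theorem parse_filename_spec : Claim_equal_parse_filename := by
  intro filename _
  show _ = _
  unfold parse_filename parse_filename_alt
  rw [pv_go_eq_zip]
  have hps : ((PySem.Str.split? (pvName filename) " - ").getD []) =
      (pvPieces (pvName filename).toList).map String.ofList := by
    simp [PySem.Str.split?, PySem.Chars.split?,
      show (" - " : String).toList = pvSep from rfl, pvSep]
    rw [show ([' ', '-', ' '] : List Char) = pvSep from rfl, pv_splitOn_eq_pieces]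
  refine (pv_ladder_eq_zip _).trans ?_
  rw [hps, List.zip_map_right, List.map_map]
  rfl
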